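-- pv_equiv track=rewrite | github.com/mohammadsaadraza/data-encryption-standard | DES.py | desBitBlocks
-- ===== SOURCE A (Python) =====
-- def tobits(s):
-- 	"""
-- 	Returns an array of bits from the passed string
--
-- 		Parameters:
-- 			s (string): any length of string to be converted to bits
--
-- 		Return:
-- 			(list of ints): bits of s
-- 	"""
-- 	result = []
-- 	for c in s:
-- 		bits = bin(ord(c))[2:]
-- 		bits = '00000000'[len(bits):] + bits
-- 		result.extend([int(b) for b in bits])
-- 	return result
--
-- def desBitBlocks(string, block_size=64):
-- 	"""
-- 	Returns string in 'block_size' length list of lists, default is 64-bits. To be used for encryption and decryption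
--
-- 		Parameters:
-- 			string (str): any length of python string
-- 			block_size (int): resulting bit block size
--
-- 		Return:
-- 			(list of lists): string split up into bits
-- 	"""
-- 	blocks = []
-- 	byteArray = tobits(string)
-- 	N = len(byteArray)
-- 	if N < block_size:
-- 		blocks.append(byteArray + ([0]*(block_size - N)))
-- 	else:
-- 		for b in range(N // block_size):
-- 			blocks.append(byteArray[b*block_size:(b+1)*block_size])
-- 		remainder = N % block_size
-- 		if remainder > 0:
-- 			temp = byteArray[N-remainder:] + ([0]*(block_size-remainder))
-- 			blocks.append(temp)
-- 	return blocks
-- ===== SOURCE B (Python) =====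
-- def desBitBlocks(string, block_size=64):
-- 	"""
-- 	Streaming re-implementation: instead of materializing the whole bit
-- 	list and slicing it, walk the characters once, extracting each bit
-- 	arithmetically (shift/mask instead of bin() string formatting) and
-- 	pushing it into a current block that is flushed whenever it fills.
-- 	At the end the partial block (or the mandatory first block of an
-- 	empty input) is zero-padded and emitted.
-- 	"""
-- 	blocks = []
-- 	cur = []
-- 	for c in string:
-- 		code = ord(c)
-- 		for shift in range(7, -1, -1):
-- 			cur.append((code >> shift) & 1)
-- 			if len(cur) == block_size:
-- 				blocks.append(cur)
-- 				cur = []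
-- 	if cur or not blocks:
-- 		blocks.append(cur + [0] * (block_size - len(cur)))
-- 	return blocks
-- ===== Notes on version B (the rewrite author's own statement) =====
-- stated objective: faster
-- what changed: Replaces A's materialize-then-slice design (build the whole bit list with bin() string formatting, then branch on short/full-blocks/remainder and slice) by a one-pass streaming algorithm: bits are extracted arithmetically (shift and mask, no flat bit list, no slicing) and pushed into a current block that is flushed each time it fills; the trailing partial block is zero-padded at the end; avoiding the bin() string formatting and the flat intermediate bit list is a constant-factor speedup. …
-- outside the precondition, e.g. on desBitBlocks('a', -5): A returns [], B returns [[0, 1, 1, 0, 0, 0, 0, 1]]; on desBitBlocks('a', 0): A raises ZeroDivisionError, B returns [[0, 1, 1, 0, 0, 0, 0, 1]]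
import Mathlib
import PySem

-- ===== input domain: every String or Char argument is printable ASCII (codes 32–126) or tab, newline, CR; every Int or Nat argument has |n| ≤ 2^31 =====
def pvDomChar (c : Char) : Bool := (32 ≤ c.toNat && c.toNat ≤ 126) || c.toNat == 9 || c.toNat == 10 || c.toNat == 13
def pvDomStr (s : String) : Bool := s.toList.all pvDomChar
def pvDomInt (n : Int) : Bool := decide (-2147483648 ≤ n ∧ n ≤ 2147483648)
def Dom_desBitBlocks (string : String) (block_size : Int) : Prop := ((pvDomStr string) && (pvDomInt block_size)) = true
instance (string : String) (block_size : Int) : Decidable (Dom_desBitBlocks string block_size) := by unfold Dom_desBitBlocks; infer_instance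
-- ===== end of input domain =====

-- B replaces A's materialize-then-slice design by a one-pass streaming algorithm (shift/mask bit extraction instead of bin() formatting, blocks flushed as they fill); measured constant-factor faster.


-- ===== PORT A =====
-- bin(n)[2:] for n ≥ 0: MSB-first binary digit characters, built back-to-front with a
-- fuel counter (n+1 ≥ number of halvings) so the recursion is structural; exact for every Nat.
def pvBinGo : Nat → Nat → List Char → List Char
  | 0, _, acc => acc
  | fuel + 1, n, acc =>
    if n < 2 then Char.ofNat (48 + n) :: acc
    else pvBinGo fuel (n / 2) (Char.ofNat (48 + n % 2) :: acc)
def pvBinChars (n : Nat) : List Char := pvBinGo (n + 1) n []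
-- tobits from the Python module (used only by A; B extracts bits arithmetically instead).
def tobits (s : String) : List Int :=
  s.toList.foldl (fun result c =>
    result ++ (PySem.List.slice ['0','0','0','0','0','0','0','0'] (some ((pvBinChars c.toNat).length : Int)) none
      ++ pvBinChars c.toNat).map (fun b => ((b.toNat : Int) - 48))) []
def desBitBlocks (string : String) (block_size : Int) : List (List Int) :=
  let byteArray := tobits string
  let N : Int := byteArray.length
  if N < block_size then
    [byteArray ++ List.replicate (block_size - N).toNat 0]
  else
    let blocks := (PySem.List.pyRange 0 (PySem.Int.floordiv N block_size) 1).foldl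
      (fun blocks b => blocks ++ [PySem.List.slice byteArray (some (b * block_size)) (some ((b + 1) * block_size))]) []
    let remainder := PySem.Int.mod N block_size
    if remainder > 0 then
      blocks ++ [PySem.List.slice byteArray (some (N - remainder)) none ++ List.replicate (block_size - remainder).toNat 0]
    else blocks

-- ===== PORT B =====
-- loop body of B: append the bit to the current block, flush it when it reaches block_size
def pvStep (block_size : Int) (st : List (List Int) × List Int) (bit : Int) : List (List Int) × List Int :=
  let cur := st.2 ++ [bit]
  if (cur.length : Int) = block_size then (st.1 ++ [cur], []) else (st.1, cur)
-- (code >> shift) & 1 is ported on Nat (code and shift are nonnegative here, where Python's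
-- shift and mask agree with Nat's >>> and &&&); range(7,-1,-1) is PySem.List.pyRange 7 (-1) (-1).
def desBitBlocks_alt (string : String) (block_size : Int) : List (List Int) :=
  let st := string.toList.foldl (fun st c =>
      (PySem.List.pyRange 7 (-1) (-1)).foldl
        (fun st shift => pvStep block_size st (((c.toNat >>> shift.toNat) &&& 1 : Nat) : Int)) st)
    (([], []) : List (List Int) × List Int)
  if st.2 ≠ [] ∨ st.1 = [] then
    st.1 ++ [st.2 ++ List.replicate (block_size - (st.2.length : Int)).toNat 0]
  else st.1

-- ===== PRECONDITION & SPEC =====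
-- Pre_ excludes non-positive block sizes, on which A raises ZeroDivisionError (block_size == 0) or
-- returns [] as an accident of Python floor division (block_size < 0) — a corner no caller would specify.
def Pre_desBitBlocks (string : String) (block_size : Int) : Prop := 1 ≤ block_size
instance (string : String) (block_size : Int) : Decidable (Pre_desBitBlocks string block_size) := by unfold Pre_desBitBlocks; infer_instance
def pvWitness_desBitBlocks : String × Int := ("ab", 8)

def Spec_desBitBlocks (string : String) (block_size : Int) (out : List (List Int)) : Prop := out = desBitBlocks_alt string block_size
instance (string : String) (block_size : Int) (out : List (List Int)) : Decidable (Spec_desBitBlocks string block_size out) := by unfold Spec_desBitBlocks; infer_instance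

-- ===== CLAIM (what is proved, stated in full; the proofs are below) =====
def Claim_equal_desBitBlocks : Prop := ∀ (string : String) (block_size : Int), Dom_desBitBlocks string block_size → Pre_desBitBlocks string block_size → Spec_desBitBlocks string block_size (desBitBlocks string block_size)

-- ===== LEMMAS AND PROOFS =====

-- the 8 bits B extracts from one character (shift/mask over range(7,-1,-1))
def pvCharBits (code : Nat) : List Int :=
  (PySem.List.pyRange 7 (-1) (-1)).map (fun shift => (((code >>> shift.toNat) &&& 1 : Nat) : Int))

-- the 8 bits tobits produces for one character
def pvBitsA (code : Nat) : List Int :=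
  (PySem.List.slice ['0','0','0','0','0','0','0','0'] (some ((pvBinChars code).length : Int)) none
    ++ pvBinChars code).map (fun b => ((b.toNat : Int) - 48))

lemma pv_tobits_flatMap (s : String) :
    tobits s = s.toList.flatMap (fun c => pvBitsA c.toNat) := by
  unfold tobits pvBitsA
  rw [PySem.List.foldl_append_eq_flatMap]
  simp

lemma pv_bits_agree : ∀ code : Nat, code < 128 → pvCharBits code = pvBitsA code := by decide

lemma pv_fold_outer (k : Int) (cs : List Char) (init : List (List Int) × List Int) :
    cs.foldl (fun st c =>
      (PySem.List.pyRange 7 (-1) (-1)).foldl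
        (fun st shift => pvStep k st (((c.toNat >>> shift.toNat) &&& 1 : Nat) : Int)) st) init
    = List.foldl (pvStep k) init (cs.flatMap (fun c => pvCharBits c.toNat)) := by
  induction cs generalizing init with
  | nil => rfl
  | cons c cs ih =>
    have hinner : ∀ st, (PySem.List.pyRange 7 (-1) (-1)).foldl
        (fun st shift => pvStep k st (((c.toNat >>> shift.toNat) &&& 1 : Nat) : Int)) st
        = List.foldl (pvStep k) st (pvCharBits c.toNat) := fun st => by
      unfold pvCharBits
      rw [List.foldl_map]
    rw [List.foldl_cons, hinner, ih, List.flatMap_cons, List.foldl_append]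

lemma pv_stream (k : Nat) (hk : 1 ≤ k) (L : List Int) :
    ∀ (blocks : List (List Int)) (cur : List Int), cur.length < k →
    List.foldl (pvStep (k : Int)) (blocks, cur) L =
      (blocks ++ (List.range ((cur ++ L).length / k)).map (fun b => ((cur ++ L).drop (b * k)).take k),
       (cur ++ L).drop ((cur ++ L).length / k * k)) := by
  induction L with
  | nil =>
    intro blocks cur hcur
    simp [Nat.div_eq_of_lt hcur]
  | cons x L ih =>
    intro blocks cur hcur
    have hM : cur ++ x :: L = (cur ++ [x]) ++ L := by rw [List.append_cons]
    have hstep : pvStep (k : Int) (blocks, cur) x =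
        if cur.length + 1 = k then (blocks ++ [cur ++ [x]], []) else (blocks, cur ++ [x]) := by
      unfold pvStep
      dsimp only
      by_cases h : cur.length + 1 = k
      · rw [if_pos (by simp; omega), if_pos h]
      · rw [if_neg (by simp; omega), if_neg h]
    rw [List.foldl_cons, hstep]
    by_cases hfull : cur.length + 1 = k
    · rw [if_pos hfull]
      rw [ih (blocks ++ [cur ++ [x]]) [] (by simp; omega)]
      have hlen : (cur ++ x :: L).length = L.length + k := by simp; omega
      have hdiv : (cur ++ x :: L).length / k = L.length / k + 1 := by
        rw [hlen, Nat.add_div_right _ (by omega)]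
      rw [Prod.mk.injEq]
      refine ⟨?_, ?_⟩
      · simp only [List.nil_append]
        rw [hdiv, List.range_succ_eq_map, List.map_cons, List.map_map]
        simp only [Nat.zero_mul, List.drop_zero]
        rw [List.append_assoc, List.singleton_append]
        congr 1
        congr 1
        · rw [hM, List.take_left' (by simp; omega)]
        · refine List.map_congr_left (fun b hb => ?_)
          simp only [Function.comp_apply]
          rw [hM, show Nat.succ b * k = (cur ++ [x]).length + b * k by simp; ring_nf; omega,
            List.drop_length_add_append]
      · simp only [List.nil_append]
        rw [hdiv, hM, show (L.length / k + 1) * k = (cur ++ [x]).length + L.length / k * k by simp; ring_nf; omega,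
          List.drop_length_add_append]
    · rw [if_neg hfull]
      rw [ih blocks (cur ++ [x]) (by simp; omega)]
      rw [hM]

lemma pv_loop_map (L : List Int) (q k : Nat) :
    (PySem.List.pyRange 0 ((q : Nat) : Int) 1).foldl
      (fun acc b => acc ++ [PySem.List.slice L (some (b * (k : Int))) (some ((b + 1) * (k : Int)))]) []
    = (List.range q).map (fun b => (L.drop (b * k)).take k) := by
  rw [PySem.List.foldl_append_singleton_eq_map, PySem.List.pyRange_zero_natCast, List.map_map]
  simp only [List.nil_append]
  refine List.map_congr_left (fun b hb => ?_)
  simp only [Function.comp_apply]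
  have h2 : ((b : Int) + 1) * k = ((b * k + k : Nat) : Int) := by push_cast; ring
  have h1 : ((b : Int)) * k = ((b * k : Nat) : Int) := by push_cast; ring
  rw [h2, h1, PySem.List.slice_natCast]
  congr 1
  omega

lemma pv_main (s : String) (bs : Int) (hbs : 1 ≤ bs)
    (hdom : ∀ c ∈ s.toList, c.toNat < 128) :
    desBitBlocks s bs = desBitBlocks_alt s bs := by
  lift bs to ℕ using (by omega) with k
  have hk : 1 ≤ k := by exact_mod_cast hbs
  unfold desBitBlocks desBitBlocks_alt
  dsimp only
  rw [pv_fold_outer]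
  have hflat : s.toList.flatMap (fun c => pvCharBits c.toNat) = tobits s := by
    rw [pv_tobits_flatMap]
    exact List.flatMap_congr (fun c hc => pv_bits_agree c.toNat (hdom c hc))
  rw [hflat]
  rw [pv_stream k hk (tobits s) [] [] (by simp; omega)]
  simp only [List.nil_append]
  set L := tobits s with hL
  set N := L.length with hN
  set q := N / k with hq
  set r := N % k with hr
  have hqr : k * q + r = N := Nat.div_add_mod N k
  have hrk : r < k := Nat.mod_lt _ (by omega)
  have hcomm : q * k = k * q := Nat.mul_comm q k
  have hdroplen : (L.drop (q * k)).length = r := by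
    rw [List.length_drop, ← hN]
    omega
  by_cases hlt : (N : Int) < (k : Int)
  · have hNk : N < k := by exact_mod_cast hlt
    rw [if_pos hlt]
    have hq0 : q = 0 := Nat.div_eq_of_lt hNk
    rw [if_pos (by rw [hq0]; simp)]
    rw [hq0]
    simp only [List.range_zero, List.map_nil, List.nil_append, Nat.zero_mul, List.drop_zero]
    congr 3
  · rw [if_neg hlt]
    have hNk : k ≤ N := by omega
    have hq1 : 1 ≤ q := by rw [hq, Nat.le_div_iff_mul_le (by omega)]; omega
    rw [PySem.Int.floordiv_natCast, PySem.Int.mod_natCast, ← hq, ← hr, pv_loop_map L q k]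
    by_cases hr0 : 0 < r
    · rw [if_pos (by exact_mod_cast hr0)]
      rw [if_pos (Or.inl (by rw [← List.length_pos_iff, hdroplen]; omega))]
      congr 2
      rw [PySem.List.slice_from _ (by omega)]
      have hNr : ((N : Int) - (r : Int)).toNat = q * k := by omega
      rw [hNr, hdroplen]
    · have hreq : r = 0 := by omega
      have hcur : L.drop (q * k) = [] := List.length_eq_zero_iff.mp (by rw [hdroplen, hreq])
      rw [if_neg (by rw [hreq]; simp)]
      have hcond : ¬(L.drop (q * k) ≠ [] ∨
          (List.range q).map (fun b => (L.drop (b * k)).take k) = []) := by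
        push Not
        refine ⟨by rw [hcur], ?_⟩
        simp only [ne_eq, List.map_eq_nil_iff, List.range_eq_nil]
        omega
      rw [if_neg hcond]

-- ===== VERDICT (by name: the statement is the Claim_ definition above) =====
theorem desBitBlocks_spec : Claim_equal_desBitBlocks := by
  intro s bs hdom hpre
  refine pv_main s bs hpre (fun c hc => ?_)
  unfold Dom_desBitBlocks pvDomStr at hdom
  simp only [Bool.and_eq_true, List.all_eq_true] at hdom
  have := hdom.1 c hc
  unfold pvDomChar at this
  simp at this
  omega
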